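-- pv_equiv track=rewrite | github.com/xogusrns123/advance-spec | simulation/pipeline/collect_draft_model.py | _iter_steps
-- ===== SOURCE A (Python) =====
-- from typing import Iterator, List, Optional, Tuple
--
-- def _iter_steps(
--     req: dict,
--     call_idx_range: Optional[Tuple[int, int]] = None,
--     skip_keys: Optional[set] = None,
--     rid: Optional[str] = None,
-- ) -> Iterator[Tuple[int, int, List[int]]]:
--     """Yield (call_idx, step_idx, context_token_ids) for every step that
--     needs a draft. Context matches the definition used by Stage 3a/Stage 4:
--     ``prompt + tokens[0:step_idx]``.
--
--     Steps where the remaining future has ≤1 token are skipped (nothing to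
--     verify).
--
--     Optional filters:
--       * ``call_idx_range = (LO, HI)`` — only emit calls with LO ≤ call_idx < HI.
--       * ``skip_keys`` + ``rid`` — skip any (rid, call_idx, step_idx)
--         tuple already present in skip_keys (parallel re-shard / resume).
--     """
--     prompt_ids_list = req.get("per_call_prompt_ids")
--     lo = call_idx_range[0] if call_idx_range else None
--     hi = call_idx_range[1] if call_idx_range else None
--     for call_idx in range(len(req["per_call_tokens"])):
--         if lo is not None and call_idx < lo:
--             continue
--         if hi is not None and call_idx >= hi:
--             continue
--         tokens = req["per_call_tokens"][call_idx]
--         n = len(tokens)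
--         if n == 0:
--             continue
--         prompt = (list(prompt_ids_list[call_idx])
--                   if prompt_ids_list and call_idx < len(prompt_ids_list)
--                   else [])
--         decoded: List[int] = []
--         for pos in range(n):
--             if n - pos <= 1:
--                 decoded.append(tokens[pos])
--                 continue
--             if skip_keys is not None and rid is not None and (
--                     rid, call_idx, pos) in skip_keys:
--                 # Already collected — advance the decoded prefix without
--                 # emitting work, so context for later positions stays right.
--                 decoded.append(tokens[pos])
--                 continue
--             context = prompt + decoded if prompt else list(decoded)
--             yield call_idx, pos, context
--             decoded.append(tokens[pos])
-- ===== SOURCE B (Python) =====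
-- from typing import Iterator, List, Optional, Tuple
--
-- def _iter_steps(
--     req: dict,
--     call_idx_range: Optional[Tuple[int, int]] = None,
--     skip_keys: Optional[set] = None,
--     rid: Optional[str] = None,
-- ) -> Iterator[Tuple[int, int, List[int]]]:
--     """Same contract as A, without the mutable ``decoded`` accumulator:
--     the context at step ``pos`` is always ``prompt + tokens[:pos]``, so it
--     is computed directly by slicing, the last position is dropped from the
--     range itself, and the call-index filter is folded into the range bounds."""
--     tokens_list = req["per_call_tokens"]
--     prompt_ids_list = req.get("per_call_prompt_ids")
--     lo, hi = call_idx_range if call_idx_range else (0, len(tokens_list))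
--     for call_idx in range(max(lo, 0), min(hi, len(tokens_list))):
--         tokens = tokens_list[call_idx]
--         prompt = (list(prompt_ids_list[call_idx])
--                   if prompt_ids_list and call_idx < len(prompt_ids_list)
--                   else [])
--         for pos in range(len(tokens) - 1):
--             if skip_keys is not None and rid is not None and (rid, call_idx, pos) in skip_keys:
--                 continue
--             yield call_idx, pos, prompt + tokens[:pos]
-- ===== Notes on version B (the rewrite author's own statement) =====
-- stated objective: simpler
-- what changed: B drops the mutable 'decoded' accumulator and the n==0 / last-position guards: it slices the context directly as prompt + tokens[:pos], iterates pos over range(len(tokens)-1), and folds the lo/hi call filter into the range bounds instead of per-iteration continues.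
import Mathlib
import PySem

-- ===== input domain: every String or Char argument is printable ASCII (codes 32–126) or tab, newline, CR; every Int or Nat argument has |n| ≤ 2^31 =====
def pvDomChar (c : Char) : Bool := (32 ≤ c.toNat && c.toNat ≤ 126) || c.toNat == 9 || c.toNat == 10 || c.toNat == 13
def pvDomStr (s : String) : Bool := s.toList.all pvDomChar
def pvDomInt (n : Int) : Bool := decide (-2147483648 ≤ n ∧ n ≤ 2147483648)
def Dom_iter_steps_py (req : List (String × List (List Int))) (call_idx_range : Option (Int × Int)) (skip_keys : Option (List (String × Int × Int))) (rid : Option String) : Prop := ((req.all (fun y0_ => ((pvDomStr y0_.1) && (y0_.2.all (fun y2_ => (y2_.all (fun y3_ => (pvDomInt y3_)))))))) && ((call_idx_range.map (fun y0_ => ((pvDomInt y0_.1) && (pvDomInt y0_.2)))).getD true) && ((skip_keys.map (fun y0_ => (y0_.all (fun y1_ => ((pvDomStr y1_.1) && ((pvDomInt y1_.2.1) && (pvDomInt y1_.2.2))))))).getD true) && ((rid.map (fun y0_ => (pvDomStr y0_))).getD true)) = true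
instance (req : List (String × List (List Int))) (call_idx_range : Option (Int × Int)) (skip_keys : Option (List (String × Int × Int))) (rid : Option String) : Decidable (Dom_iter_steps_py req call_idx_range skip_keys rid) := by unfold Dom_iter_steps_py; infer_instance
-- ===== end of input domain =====

-- ===== PORT A =====
-- B changes: context computed by slicing instead of a mutable decoded-prefix accumulator,
-- and the call-index filter folded into the range bounds (objective: simpler).
-- A-side helpers
def pvA_skip (skip_keys : Option (List (String × Int × Int))) (rid : Option String)
    (ci pos : Int) : Bool :=
  match skip_keys, rid with
  | some sk, some r => sk.contains (r, ci, pos)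
  | _, _ => false

def pvA_prompt (pil : Option (List (List Int))) (ci : Int) : List Int :=
  match pil with
  | none => []
  | some pl => if pl ≠ [] ∧ ci < (pl.length : Int) then PySem.List.pyGetD pl ci [] else []

def pvA_inner (sk : Option (List (String × Int × Int))) (rid : Option String)
    (ci n : Int) (tokens prompt : List Int) :
    List Int → List Int → List (Int × Int × List Int)
  | [], _ => []
  | pos :: rest, decoded =>
      if n - pos ≤ 1 then
        pvA_inner sk rid ci n tokens prompt rest (decoded ++ [PySem.List.pyGetD tokens pos 0])
      else if pvA_skip sk rid ci pos then
        pvA_inner sk rid ci n tokens prompt rest (decoded ++ [PySem.List.pyGetD tokens pos 0])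
      else
        (ci, pos, if prompt = [] then decoded else prompt ++ decoded) ::
          pvA_inner sk rid ci n tokens prompt rest (decoded ++ [PySem.List.pyGetD tokens pos 0])

def pvA_outer (pil : Option (List (List Int))) (lo hi : Option Int)
    (sk : Option (List (String × Int × Int))) (rid : Option String)
    (tokensList : List (List Int)) : List Int → List (Int × Int × List Int)
  | [] => []
  | ci :: rest =>
      if (match lo with | some l => decide (ci < l) | none => false) then
        pvA_outer pil lo hi sk rid tokensList rest
      else if (match hi with | some h => decide (h ≤ ci) | none => false) then
        pvA_outer pil lo hi sk rid tokensList rest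
      else
        let tokens := PySem.List.pyGetD tokensList ci []
        let n : Int := tokens.length
        if n = 0 then pvA_outer pil lo hi sk rid tokensList rest
        else
          pvA_inner sk rid ci n tokens (pvA_prompt pil ci) (PySem.List.pyRange 0 n 1) [] ++
            pvA_outer pil lo hi sk rid tokensList rest

def iter_steps_py (req : List (String × List (List Int))) (call_idx_range : Option (Int × Int)) (skip_keys : Option (List (String × Int × Int))) (rid : Option String) : List (Int × Int × List Int) :=
  let pil := (PySem.Dict.mk req).get? "per_call_prompt_ids"
  let lo := call_idx_range.map Prod.fst
  let hi := call_idx_range.map Prod.snd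
  let tokensList := ((PySem.Dict.mk req).get? "per_call_tokens").getD []
  pvA_outer pil lo hi skip_keys rid tokensList
    (PySem.List.pyRange 0 (tokensList.length : Int) 1)

-- ===== PORT B =====
-- B-side helpers
def pvB_skip (skip_keys : Option (List (String × Int × Int))) (rid : Option String)
    (ci pos : Int) : Bool :=
  match skip_keys, rid with
  | some sk, some r => sk.contains (r, ci, pos)
  | _, _ => false

def pvB_steps (sk : Option (List (String × Int × Int))) (rid : Option String)
    (ci : Int) (tokens prompt : List Int) : List Nat → List (Int × Int × List Int)
  | [] => []
  | pos :: rest =>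
      if pvB_skip sk rid ci (pos : Int) then pvB_steps sk rid ci tokens prompt rest
      else (ci, (pos : Int), prompt ++ tokens.take pos) :: pvB_steps sk rid ci tokens prompt rest

def pvB_call (pil : Option (List (List Int))) (sk : Option (List (String × Int × Int)))
    (rid : Option String) (tokensList : List (List Int)) (ci : Int) :
    List (Int × Int × List Int) :=
  let tokens := PySem.List.pyGetD tokensList ci []
  let prompt : List Int :=
    match pil with
    | none => []
    | some pl => if pl ≠ [] ∧ ci < (pl.length : Int) then PySem.List.pyGetD pl ci [] else []
  pvB_steps sk rid ci tokens prompt (List.range (tokens.length - 1))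

def iter_steps_py_alt (req : List (String × List (List Int))) (call_idx_range : Option (Int × Int)) (skip_keys : Option (List (String × Int × Int))) (rid : Option String) : List (Int × Int × List Int) :=
  let tokensList := ((PySem.Dict.mk req).get? "per_call_tokens").getD []
  let pil := (PySem.Dict.mk req).get? "per_call_prompt_ids"
  let lh := call_idx_range.getD (0, (tokensList.length : Int))
  (PySem.List.pyRange (max lh.1 0) (min lh.2 (tokensList.length : Int)) 1).flatMap
    (pvB_call pil skip_keys rid tokensList)

-- ===== PRECONDITION & SPEC =====
-- Pre_ excludes exactly the reqs without a "per_call_tokens" key, on which A raises KeyError.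
def Pre_iter_steps_py (req : List (String × List (List Int))) (call_idx_range : Option (Int × Int)) (skip_keys : Option (List (String × Int × Int))) (rid : Option String) : Prop :=
  ((PySem.Dict.mk req).get? "per_call_tokens").isSome = true
instance (req : List (String × List (List Int))) (call_idx_range : Option (Int × Int)) (skip_keys : Option (List (String × Int × Int))) (rid : Option String) : Decidable (Pre_iter_steps_py req call_idx_range skip_keys rid) := by unfold Pre_iter_steps_py; infer_instance

def pvWitness_iter_steps_py : (List (String × List (List Int))) × (Option (Int × Int)) × (Option (List (String × Int × Int))) × Option String :=
  ([("per_call_tokens", [[1, 2, 3]])], none, none, none)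

def Spec_iter_steps_py (req : List (String × List (List Int))) (call_idx_range : Option (Int × Int)) (skip_keys : Option (List (String × Int × Int))) (rid : Option String) (out : List (Int × Int × List Int)) : Prop := out = iter_steps_py_alt req call_idx_range skip_keys rid
instance (req : List (String × List (List Int))) (call_idx_range : Option (Int × Int)) (skip_keys : Option (List (String × Int × Int))) (rid : Option String) (out : List (Int × Int × List Int)) : Decidable (Spec_iter_steps_py req call_idx_range skip_keys rid out) := by unfold Spec_iter_steps_py; infer_instance

-- ===== CLAIM (what is proved, stated in full; the proofs are below) =====
def Claim_equal_iter_steps_py : Prop := ∀ (req : List (String × List (List Int))) (call_idx_range : Option (Int × Int)) (skip_keys : Option (List (String × Int × Int))) (rid : Option String), Dom_iter_steps_py req call_idx_range skip_keys rid → Pre_iter_steps_py req call_idx_range skip_keys rid → Spec_iter_steps_py req call_idx_range skip_keys rid (iter_steps_py req call_idx_range skip_keys rid)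

-- ===== LEMMAS AND PROOFS =====

theorem pvA_skip_eq_pvB_skip : pvA_skip = pvB_skip := rfl

-- inner loop: the decoded accumulator always equals tokens.take k
theorem pvInner_spec (sk : Option (List (String × Int × Int))) (rid : Option String)
    (ci : Int) (tokens prompt : List Int) :
    ∀ (m k : Nat), tokens.length = k + m →
    pvA_inner sk rid ci (tokens.length : Int) tokens prompt
      (PySem.List.pyRange (k : Int) (tokens.length : Int) 1) (tokens.take k)
    = pvB_steps sk rid ci tokens prompt (List.range' k (tokens.length - 1 - k)) := by
  intro m
  induction m with
  | zero =>
      intro k hk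
      rw [PySem.List.pyRange_one_eq_nil (by omega)]
      have h0 : tokens.length - 1 - k = 0 := by omega
      rw [h0]
      rfl
  | succ m ih =>
      intro k hk
      rw [PySem.List.pyRange_one_cons (by push_cast; omega)]
      have hdec : tokens.take k ++ [PySem.List.pyGetD tokens (k : Int) 0] = tokens.take (k + 1) := by
        rw [PySem.List.pyGetD_natCast, List.take_succ]
        have : tokens[k]? = some (tokens.getD k 0) := by
          rw [List.getD_eq_getElem?_getD, List.getElem?_eq_getElem (by omega)]
          simp [List.getElem?_eq_getElem (show k < tokens.length by omega)]
        rw [this]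
        rfl
      by_cases hm : m = 0
      · subst hm
        have hcond : (tokens.length : Int) - (k : Int) ≤ 1 := by push_cast; omega
        rw [pvA_inner, if_pos hcond, hdec]
        have : ((k : Int) + 1) = ((k + 1 : Nat) : Int) := by push_cast; ring
        rw [this, ih (k + 1) (by omega)]
        have h1 : tokens.length - 1 - k = 0 := by omega
        have h2 : tokens.length - 1 - (k + 1) = 0 := by omega
        rw [h1, h2, List.range'_zero, List.range'_zero]
      · have hcond : ¬ ((tokens.length : Int) - (k : Int) ≤ 1) := by push_cast; omega
        rw [pvA_inner, if_neg hcond, hdec]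
        have hcast : ((k : Int) + 1) = ((k + 1 : Nat) : Int) := by push_cast; ring
        have hrange : tokens.length - 1 - k = (m - 1) + 1 := by omega
        have hrange2 : tokens.length - 1 - (k + 1) = m - 1 := by omega
        rw [hrange, List.range'_succ, hcast, ih (k + 1) (by omega), hrange2,
            pvA_skip_eq_pvB_skip]
        by_cases hs : pvB_skip sk rid ci (k : Int) = true
        · rw [pvB_steps, if_pos hs, if_pos hs]
        · rw [pvB_steps, if_neg hs, if_neg hs]
          by_cases hp : prompt = []
          · subst hp; simp
          · rw [if_neg hp]

-- A's per-call body (guards as in the port), as a function of the call index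
def pvFA (pil : Option (List (List Int))) (lo hi : Option Int)
    (sk : Option (List (String × Int × Int))) (rid : Option String)
    (tl : List (List Int)) (ci : Int) : List (Int × Int × List Int) :=
  if (match lo with | some l => decide (ci < l) | none => false) then []
  else if (match hi with | some h => decide (h ≤ ci) | none => false) then []
  else
    let tokens := PySem.List.pyGetD tl ci []
    if (tokens.length : Int) = 0 then []
    else pvA_inner sk rid ci (tokens.length : Int) tokens (pvA_prompt pil ci)
          (PySem.List.pyRange 0 (tokens.length : Int) 1) []

theorem pvA_outer_eq_flatMap (pil : Option (List (List Int))) (lo hi : Option Int)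
    (sk : Option (List (String × Int × Int))) (rid : Option String)
    (tl : List (List Int)) :
    ∀ cis : List Int, pvA_outer pil lo hi sk rid tl cis = cis.flatMap (pvFA pil lo hi sk rid tl) := by
  intro cis
  induction cis with
  | nil => rfl
  | cons ci rest ih =>
      rw [List.flatMap_cons, ← ih]
      show (if (match lo with | some l => decide (ci < l) | none => false) then
              pvA_outer pil lo hi sk rid tl rest
            else if (match hi with | some h => decide (h ≤ ci) | none => false) then
              pvA_outer pil lo hi sk rid tl rest
            else
              let tokens := PySem.List.pyGetD tl ci []
              let n : Int := tokens.length
              if n = 0 then pvA_outer pil lo hi sk rid tl rest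
              else
                pvA_inner sk rid ci n tokens (pvA_prompt pil ci) (PySem.List.pyRange 0 n 1) [] ++
                  pvA_outer pil lo hi sk rid tl rest)
          = pvFA pil lo hi sk rid tl ci ++ pvA_outer pil lo hi sk rid tl rest
      unfold pvFA
      split_ifs <;> simp_all <;> split_ifs <;> simp

-- A's guarded body equals B's per-call body, for every index
theorem pvBody_eq (pil : Option (List (List Int))) (sk : Option (List (String × Int × Int)))
    (rid : Option String) (tl : List (List Int)) (ci : Int) :
    (let tokens := PySem.List.pyGetD tl ci []
     if (tokens.length : Int) = 0 then []
     else pvA_inner sk rid ci (tokens.length : Int) tokens (pvA_prompt pil ci)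
           (PySem.List.pyRange 0 (tokens.length : Int) 1) [])
    = pvB_call pil sk rid tl ci := by
  show (if ((PySem.List.pyGetD tl ci []).length : Int) = 0 then []
        else pvA_inner sk rid ci ((PySem.List.pyGetD tl ci []).length : Int)
              (PySem.List.pyGetD tl ci []) (pvA_prompt pil ci)
              (PySem.List.pyRange 0 ((PySem.List.pyGetD tl ci []).length : Int) 1) [])
       = pvB_call pil sk rid tl ci
  set tokens := PySem.List.pyGetD tl ci [] with htok
  have hB : pvB_call pil sk rid tl ci
      = pvB_steps sk rid ci tokens (pvA_prompt pil ci) (List.range (tokens.length - 1)) := by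
    unfold pvB_call pvA_prompt
    rw [← htok]
  rw [hB]
  by_cases h0 : (tokens.length : Int) = 0
  · have : tokens.length = 0 := by omega
    rw [if_pos h0, this]
    rfl
  · rw [if_neg h0]
    have := pvInner_spec sk rid ci tokens (pvA_prompt pil ci) tokens.length 0 (by omega)
    simpa [List.range_eq_range'] using this

-- folding the [lo,hi) filter into the range bounds
theorem pvWindow (g : Int → List (Int × Int × List Int)) (lo hi : Int) :
    ∀ len : Nat,
    (PySem.List.pyRange 0 (len : Int) 1).flatMap
        (fun ci => if lo ≤ ci ∧ ci < hi then g ci else [])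
    = (PySem.List.pyRange (max lo 0) (min hi (len : Int)) 1).flatMap g := by
  intro len
  induction len with
  | zero =>
      rw [PySem.List.pyRange_one_eq_nil (by omega), PySem.List.pyRange_one_eq_nil (by omega)]
      simp
  | succ len ih =>
      have hcast : ((len + 1 : Nat) : Int) = (len : Int) + 1 := by push_cast; ring
      by_cases hhi : hi ≤ (len : Int)
      · have h1 : min hi ((len + 1 : Nat) : Int) = min hi (len : Int) := by omega
        rw [h1, ← ih, hcast, PySem.List.pyRange_one_succ_right (by omega),
            List.flatMap_append]
        have : (if lo ≤ (len : Int) ∧ (len : Int) < hi then g (len : Int) else []) = [] := by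
          rw [if_neg (by omega)]
        simp [this]
      · by_cases hlo : lo ≤ (len : Int)
        · have h1 : min hi ((len + 1 : Nat) : Int) = (len : Int) + 1 := by omega
          have h2 : min hi (len : Int) = (len : Int) := by omega
          rw [h1, hcast, PySem.List.pyRange_one_succ_right (by omega),
              PySem.List.pyRange_one_succ_right (by omega), List.flatMap_append,
              List.flatMap_append, ih, h2]
          have : (if lo ≤ (len : Int) ∧ (len : Int) < hi then g (len : Int) else [])
              = g (len : Int) := by rw [if_pos (by omega)]
          simp [this]
        · have h1 : (PySem.List.pyRange (max lo 0) (min hi ((len + 1 : Nat) : Int)) 1) = [] :=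
            PySem.List.pyRange_one_eq_nil (by omega)
          have h2 : (PySem.List.pyRange (max lo 0) (min hi (len : Int)) 1) = [] :=
            PySem.List.pyRange_one_eq_nil (by omega)
          rw [h1, hcast, PySem.List.pyRange_one_succ_right (by omega), List.flatMap_append, ih, h2]
          have : (if lo ≤ (len : Int) ∧ (len : Int) < hi then g (len : Int) else []) = [] := by
            rw [if_neg (by omega)]
          simp [this]

-- ===== VERDICT (by name: the statement is the Claim_ definition above) =====
theorem iter_steps_py_spec : Claim_equal_iter_steps_py := by
  intro req call_idx_range skip_keys rid _hdom _hpre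
  unfold Spec_iter_steps_py
  cases call_idx_range with
  | none =>
      show iter_steps_py req none skip_keys rid = iter_steps_py_alt req none skip_keys rid
      simp only [iter_steps_py, iter_steps_py_alt, Option.map_none, Option.getD_none]
      generalize ((PySem.Dict.mk req).get? "per_call_tokens").getD [] = tl
      generalize (PySem.Dict.mk req).get? "per_call_prompt_ids" = pil
      rw [pvA_outer_eq_flatMap]
      have hF : pvFA pil none none skip_keys rid tl = pvB_call pil skip_keys rid tl := by
        funext ci
        have hb := pvBody_eq pil skip_keys rid tl ci
        simpa [pvFA] using hb
      rw [hF]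
      have hmax : max (0 : Int) 0 = 0 := by omega
      have hmin : min ((tl.length : Int)) ((tl.length : Int)) = (tl.length : Int) := by omega
      simp only [hmax, hmin]
  | some lh =>
      obtain ⟨l, h⟩ := lh
      show iter_steps_py req (some (l, h)) skip_keys rid
          = iter_steps_py_alt req (some (l, h)) skip_keys rid
      simp only [iter_steps_py, iter_steps_py_alt, Option.map_some, Option.getD_some]
      generalize ((PySem.Dict.mk req).get? "per_call_tokens").getD [] = tl
      generalize (PySem.Dict.mk req).get? "per_call_prompt_ids" = pil
      rw [pvA_outer_eq_flatMap]
      have hF : pvFA pil (some l) (some h) skip_keys rid tl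
          = fun ci => if l ≤ ci ∧ ci < h then pvB_call pil skip_keys rid tl ci else [] := by
        funext ci
        by_cases h1 : ci < l
        · have : ¬ (l ≤ ci ∧ ci < h) := by omega
          simp [pvFA, h1, this]
        · by_cases h2 : h ≤ ci
          · have : ¬ (l ≤ ci ∧ ci < h) := by omega
            simp [pvFA, h1, h2, this]
          · have hw : l ≤ ci ∧ ci < h := ⟨by omega, by omega⟩
            have hb := pvBody_eq pil skip_keys rid tl ci
            simp only [pvFA, h1, h2, decide_eq_true_eq, if_neg h1, if_neg h2, if_pos hw]
            simpa using hb
      rw [hF]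
      exact pvWindow (pvB_call pil skip_keys rid tl) l h tl.length
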